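-- pv_equiv track=rewrite | github.com/nixxholas/IS111-rekt | LabTest/IS111-2019T1-LT1/resource/q4.py | get_similarity_level
-- ===== SOURCE A (Python) =====
-- import string
--
-- def get_similarity_level(string1, string2):
--     if string1 == string2: return 'same'
--     if string1.lower() == string2.lower(): return 'close'
--     str1nums, str1chars, str1syms, str2nums, str2chars, str2syms = 0, 0, '', 0, 0, ''
--     smaller_str = list(string1 if len(string1) < len(string2) else string2)
--     bigger_str = list(string1 if len(string1) > len(string2) else string2)
--
--     for c in bigger_str:
--         if c in string.ascii_letters:
--             if c in smaller_str:
--                 smaller_str.remove(c)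
--                 str1chars += 1
--                 str2chars += 1
--             else:
--                 str2chars += 1
--         elif c.isnumeric():
--             if c in smaller_str:
--                 smaller_str.remove(c)
--                 str1nums += 1
--                 str2nums += 1
--             else:
--                 str2nums += 1
--         elif c in smaller_str:
--             smaller_str.remove(c)
--             str1syms += c
--             str2syms += c
--         else:
--             str2syms += c
--
--     if (str1nums == str2nums) and (str1chars == str2chars) and (len(string1) == len(string2)) and len(str1syms) > 0 and \
--             len(str2syms) > 0:
--         for c in str1syms:
--             if c in str2syms:
--                 return 'weak'
--         return 'somewhat'
--
--     return 'different'
-- ===== SOURCE B (Python) =====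
-- import string
--
-- def get_similarity_level(string1, string2):
--     if string1 == string2:
--         return 'same'
--     if string1.lower() == string2.lower():
--         return 'close'
--     if len(string1) != len(string2):
--         return 'different'
--     if any(c not in string.ascii_letters and not c.isnumeric() for c in string2):
--         return 'weak'
--     return 'different'
-- ===== Notes on version B (the rewrite author's own statement) =====
-- stated objective: simpler
-- what changed: Replaced the multiset-matching loop (mutable smaller/bigger lists, six counters, list.remove, a second scan over the symbol strings) by direct guards: when lengths are equal A's smaller and bigger lists are both string2, so counts always match and the result is 'weak' iff string2 contains a non-letter non-digit character; 'somewhat' is unreachable.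
import Mathlib
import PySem

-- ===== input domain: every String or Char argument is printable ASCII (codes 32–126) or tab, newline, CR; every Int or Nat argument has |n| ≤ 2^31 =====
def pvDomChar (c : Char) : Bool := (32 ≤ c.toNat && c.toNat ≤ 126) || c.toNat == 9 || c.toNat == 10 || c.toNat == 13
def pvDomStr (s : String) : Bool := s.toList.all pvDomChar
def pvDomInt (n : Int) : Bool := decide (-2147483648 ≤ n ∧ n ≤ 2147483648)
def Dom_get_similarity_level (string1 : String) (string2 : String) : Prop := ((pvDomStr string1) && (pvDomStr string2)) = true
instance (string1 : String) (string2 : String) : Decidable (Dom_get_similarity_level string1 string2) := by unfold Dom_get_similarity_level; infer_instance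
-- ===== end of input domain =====

-- B replaces A's multiset-matching loop by direct guards: with equal lengths A's smaller and
-- bigger lists are both string2, so the counts always match and the answer is 'weak' iff
-- string2 contains a non-letter non-digit character ('somewhat' is unreachable); simpler.


-- shared character tests (both Pythons import `string` and use the same tests)
-- `c in string.ascii_letters`
def pvIsLetter (c : Char) : Bool :=
  "abcdefghijklmnopqrstuvwxyzABCDEFGHIJKLMNOPQRSTUVWXYZ".toList.contains c
-- `c.isnumeric()` — exact on the ASCII domain, where isnumeric coincides with isdigit
def pvIsNumeric (c : Char) : Bool := PySem.Chars.isdigit c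

-- ===== PORT A =====
structure PvAState where
  n1 : Int
  ch1 : Int
  sy1 : List Char
  n2 : Int
  ch2 : Int
  sy2 : List Char
  smaller : List Char
deriving Repr

-- one iteration of A's `for c in bigger_str` loop; `smaller_str.remove(c)` is guarded by
-- `c in smaller_str`, so `List.erase` (first occurrence) is Python-exact here
def pvStepA (st : PvAState) (c : Char) : PvAState :=
  if pvIsLetter c then
    if st.smaller.contains c then
      { st with smaller := st.smaller.erase c, ch1 := st.ch1 + 1, ch2 := st.ch2 + 1 }
    else { st with ch2 := st.ch2 + 1 }
  else if pvIsNumeric c then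
    if st.smaller.contains c then
      { st with smaller := st.smaller.erase c, n1 := st.n1 + 1, n2 := st.n2 + 1 }
    else { st with n2 := st.n2 + 1 }
  else if st.smaller.contains c then
    { st with smaller := st.smaller.erase c, sy1 := st.sy1 ++ [c], sy2 := st.sy2 ++ [c] }
  else { st with sy2 := st.sy2 ++ [c] }

-- A's final `for c in str1syms: if c in str2syms: return 'weak'` / `return 'somewhat'`
def pvSymsLoop : List Char → List Char → String
  | [], _ => "somewhat"
  | c :: rest, sy2 => if sy2.contains c then "weak" else pvSymsLoop rest sy2

def get_similarity_level (string1 : String) (string2 : String) : String :=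
  if string1 == string2 then "same"
  else if PySem.Str.lower string1 == PySem.Str.lower string2 then "close"
  else
    let s1 := string1.toList
    let s2 := string2.toList
    let smaller_str := if s1.length < s2.length then s1 else s2
    let bigger_str := if s1.length > s2.length then s1 else s2
    let st := bigger_str.foldl pvStepA ⟨0, 0, [], 0, 0, [], smaller_str⟩
    if st.n1 == st.n2 && st.ch1 == st.ch2 && s1.length == s2.length
        && decide (0 < st.sy1.length) && decide (0 < st.sy2.length) then
      pvSymsLoop st.sy1 st.sy2
    else "different"

-- ===== PORT B =====
def get_similarity_level_alt (string1 : String) (string2 : String) : String :=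
  if string1 == string2 then "same"
  else if PySem.Str.lower string1 == PySem.Str.lower string2 then "close"
  else if string1.toList.length != string2.toList.length then "different"
  else if string2.toList.any (fun c => !pvIsLetter c && !pvIsNumeric c) then "weak"
  else "different"

-- ===== PRECONDITION & SPEC =====
def Spec_get_similarity_level (string1 : String) (string2 : String) (out : String) : Prop := out = get_similarity_level_alt string1 string2
instance (string1 : String) (string2 : String) (out : String) : Decidable (Spec_get_similarity_level string1 string2 out) := by unfold Spec_get_similarity_level; infer_instance

-- ===== CLAIM (what is proved, stated in full; the proofs are below) =====
def Claim_equal_get_similarity_level : Prop := ∀ (string1 : String) (string2 : String), Dom_get_similarity_level string1 string2 → Spec_get_similarity_level string1 string2 (get_similarity_level string1 string2)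

-- ===== LEMMAS AND PROOFS =====

-- A's loop run on `l` with `smaller` also being exactly `l` keeps the two sides in lockstep:
-- every character is found and removed head-first, so the counters stay pairwise equal and
-- both symbol accumulators collect the non-letter non-digit characters of `l` in order.
theorem pvFoldA_lockstep (l : List Char) (st : PvAState)
    (hsm : st.smaller = l) (hn : st.n1 = st.n2) (hch : st.ch1 = st.ch2) (hsy : st.sy1 = st.sy2) :
    (l.foldl pvStepA st).n1 = (l.foldl pvStepA st).n2 ∧
    (l.foldl pvStepA st).ch1 = (l.foldl pvStepA st).ch2 ∧
    (l.foldl pvStepA st).sy1 = st.sy1 ++ l.filter (fun c => !pvIsLetter c && !pvIsNumeric c) ∧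
    (l.foldl pvStepA st).sy2 = st.sy2 ++ l.filter (fun c => !pvIsLetter c && !pvIsNumeric c) := by
  induction l generalizing st with
  | nil => simp [hn, hch, hsy]
  | cons c rest ih =>
    have hmem : c ∈ st.smaller := by rw [hsm]; exact List.mem_cons_self ..
    have herase : st.smaller.erase c = rest := by rw [hsm]; exact List.erase_cons_head ..
    simp only [List.foldl_cons, List.filter_cons]
    by_cases hL : pvIsLetter c = true
    · have h := ih { st with smaller := rest, ch1 := st.ch1 + 1, ch2 := st.ch2 + 1 } rfl hn (by simp [hch]) hsy
      simpa [pvStepA, hL, hmem, herase] using h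
    · by_cases hN : pvIsNumeric c = true
      · have h := ih { st with smaller := rest, n1 := st.n1 + 1, n2 := st.n2 + 1 } rfl (by simp [hn]) hch hsy
        simpa [pvStepA, hL, hN, hmem, herase] using h
      · have h := ih { st with smaller := rest, sy1 := st.sy1 ++ [c], sy2 := st.sy2 ++ [c] } rfl hn hch (by simp [hsy])
        simpa [pvStepA, hL, hN, hmem, herase] using h

-- ===== VERDICT (by name: the statement is the Claim_ definition above) =====
theorem get_similarity_level_spec : Claim_equal_get_similarity_level := by
  intro string1 string2 _
  unfold Spec_get_similarity_level get_similarity_level get_similarity_level_alt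
  by_cases heq : (string1 == string2) = true
  · simp [heq]
  · by_cases hlo : (PySem.Str.lower string1 == PySem.Str.lower string2) = true
    · simp [heq, hlo]
    · simp only [heq, hlo, Bool.false_eq_true, if_false]
      by_cases hlen : string1.toList.length = string2.toList.length
      · -- equal lengths: smaller and bigger are both string2
        have hsm : (if string1.toList.length < string2.toList.length then string1.toList else string2.toList) = string2.toList := by
          rw [if_neg]; omega
        have hbg : (if string1.toList.length > string2.toList.length then string1.toList else string2.toList) = string2.toList := by
          rw [if_neg]; omega
        rw [hsm, hbg]
        obtain ⟨hn, hch, hsy1, hsy2⟩ :=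
          pvFoldA_lockstep string2.toList ⟨0, 0, [], 0, 0, [], string2.toList⟩ rfl rfl rfl rfl
        simp only [List.nil_append] at hsy1 hsy2
        by_cases hany : string2.toList.any (fun c => !pvIsLetter c && !pvIsNumeric c) = true
        · -- some symbol character: the filter is nonempty, A reaches the syms loop, equal lists give 'weak'
          have hfil : string2.toList.filter (fun c => !pvIsLetter c && !pvIsNumeric c) ≠ [] := by
            rw [List.any_eq_true] at hany
            obtain ⟨c, hc, hpc⟩ := hany
            exact List.ne_nil_of_mem (List.mem_filter.mpr ⟨hc, hpc⟩)
          obtain ⟨c, rest, hcr⟩ := List.exists_cons_of_ne_nil hfil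
          rw [hcr] at hsy1 hsy2
          simp [hn, hch, hlen, hsy1, hsy2, hany, pvSymsLoop]
        · -- no symbol character: str1syms is empty, A's big condition fails
          have hfil : string2.toList.filter (fun c => !pvIsLetter c && !pvIsNumeric c) = [] := by
            rw [List.filter_eq_nil_iff]
            intro c hc
            by_contra hpc
            exact hany (List.any_eq_true.mpr ⟨c, hc, by simpa using hpc⟩)
          rw [hfil] at hsy1
          simp [hany, hsy1, hlen]
      · -- different lengths: A's `len(string1) == len(string2)` conjunct fails
        have hlen' : ¬ string1.length = string2.length := by
          simpa [String.length_toList] using hlen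
        simp [hlen']
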